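-- pv_equiv track=rewrite | github.com/hivdb/chat_HIVDB_paper | advanced-prompting/00_convert_docx_to_md.py | merge_runs
-- ===== SOURCE A (Python) =====
-- def merge_runs(runs):
--     merged = []
--     for text, bold, italic in runs:
--         if not text:
--             continue
--         if merged and merged[-1][1:] == (bold, italic):
--             merged[-1] = (merged[-1][0] + text, bold, italic)
--         else:
--             merged.append((text, bold, italic))
--     return merged
-- ===== SOURCE B (Python) =====
-- def merge_runs(runs):
--     return _dc([r for r in runs if r[0]])
--
-- def _dc(rs):
--     if len(rs) <= 1:
--         return rs[:]
--     mid = len(rs) // 2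
--     return _glue(_dc(rs[:mid]), _dc(rs[mid:]))
--
-- def _glue(left, right):
--     if left and right and left[-1][1:] == right[0][1:]:
--         t, b, i = right[0]
--         return left[:-1] + [(left[-1][0] + t, b, i)] + right[1:]
--     return left + right
-- ===== Notes on version B (the rewrite author's own statement) =====
-- stated objective: alternative
-- what changed: Replaces A's left-to-right accumulator loop (which rewrites its last element) by a divide-and-conquer scheme: drop empty-text runs, recursively merge each half of the list, then glue the two merged halves at the boundary, concatenating the last run of the left half with the first of the right when their formatting matches.
import Mathlib
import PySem

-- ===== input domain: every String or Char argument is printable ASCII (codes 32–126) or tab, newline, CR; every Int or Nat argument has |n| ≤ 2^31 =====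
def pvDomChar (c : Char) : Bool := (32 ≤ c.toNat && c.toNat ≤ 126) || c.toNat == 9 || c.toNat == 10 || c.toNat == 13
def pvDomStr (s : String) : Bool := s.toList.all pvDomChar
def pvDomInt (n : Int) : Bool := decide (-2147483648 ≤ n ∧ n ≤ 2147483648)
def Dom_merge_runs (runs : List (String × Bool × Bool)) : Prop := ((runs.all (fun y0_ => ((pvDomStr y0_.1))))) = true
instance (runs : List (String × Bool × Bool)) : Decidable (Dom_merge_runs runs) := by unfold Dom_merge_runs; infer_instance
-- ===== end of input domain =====

-- B replaces A's accumulator loop by divide and conquer: filter out empty-text runs,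
-- recursively merge each half, glue the halves at the boundary. Alternative structure, not faster.

-- ===== PORT A =====
-- one iteration of A's for-loop body over the accumulator `merged`
def mergeStep (merged : List (String × Bool × Bool)) (r : String × Bool × Bool) :
    List (String × Bool × Bool) :=
  if r.1 = "" then merged
  else
    match merged.getLast? with
    | some last =>
        if last.2 = r.2 then merged.dropLast ++ [(last.1 ++ r.1, r.2.1, r.2.2)]
        else merged ++ [r]
    | none => merged ++ [r]

def merge_runs (runs : List (String × Bool × Bool)) : List (String × Bool × Bool) :=
  runs.foldl mergeStep []

-- ===== PORT B =====
-- _glue: concatenate two merged lists, joining at the boundary when formats match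
def glue (left right : List (String × Bool × Bool)) : List (String × Bool × Bool) :=
  match left.getLast?, right with
  | some last, r :: rtail =>
      if last.2 = r.2 then left.dropLast ++ (last.1 ++ r.1, r.2.1, r.2.2) :: rtail
      else left ++ right
  | _, _ => left ++ right

-- _dc: split in half, merge each half recursively, glue
def dcMerge (rs : List (String × Bool × Bool)) : List (String × Bool × Bool) :=
  if _h : rs.length ≤ 1 then rs
  else
    glue (dcMerge (rs.take (rs.length / 2))) (dcMerge (rs.drop (rs.length / 2)))
  termination_by rs.length
  decreasing_by
  · simp only [List.length_take]; omega
  · simp only [List.length_drop]; omega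

def merge_runs_alt (runs : List (String × Bool × Bool)) : List (String × Bool × Bool) :=
  dcMerge (runs.filter (fun r => r.1 ≠ ""))

-- ===== PRECONDITION & SPEC =====
def Spec_merge_runs (runs : List (String × Bool × Bool)) (out : List (String × Bool × Bool)) : Prop := out = merge_runs_alt runs
instance (runs : List (String × Bool × Bool)) (out : List (String × Bool × Bool)) : Decidable (Spec_merge_runs runs out) := by unfold Spec_merge_runs; infer_instance

-- ===== CLAIM (what is proved, stated in full; the proofs are below) =====
def Claim_equal_merge_runs : Prop := ∀ (runs : List (String × Bool × Bool)), Dom_merge_runs runs → Spec_merge_runs runs (merge_runs runs)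

-- ===== LEMMAS AND PROOFS =====

-- proof-side normal form of a merged list: concatenated texts of consecutive equal-format groups
def joinTexts (l : List (String × Bool × Bool)) : String :=
  l.foldl (fun acc r => acc ++ r.1) ""

def groupMerge : List (String × Bool × Bool) → List (String × Bool × Bool)
  | [] => []
  | r :: rest =>
      (r.1 ++ joinTexts (rest.takeWhile (fun s => s.2 = r.2)), r.2.1, r.2.2) ::
        groupMerge (rest.dropWhile (fun s => s.2 = r.2))
  termination_by l => l.length
  decreasing_by simpa using Nat.lt_succ_of_le (List.length_dropWhile_le _ _)

-- empty-text runs are skipped by A's loop, so folding over the filtered list is the same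
theorem foldl_mergeStep_filter (runs : List (String × Bool × Bool))
    (acc : List (String × Bool × Bool)) :
    runs.foldl mergeStep acc = (runs.filter (fun r => r.1 ≠ "")).foldl mergeStep acc := by
  induction runs generalizing acc with
  | nil => rfl
  | cons r rest ih =>
      by_cases h : r.1 = ""
      · simp [h, ih, mergeStep]
      · simp [h, ih]

theorem mergeStep_ne_nil (ys : List (String × Bool × Bool)) (r : String × Bool × Bool)
    (h : ys ≠ []) : mergeStep ys r ≠ [] := by
  unfold mergeStep
  split
  · exact h
  · split
    · split <;> simp
    · simp

-- entries before the last are frozen: A's loop only ever touches the current tail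
theorem foldl_mergeStep_append (l : List (String × Bool × Bool))
    (acc ys : List (String × Bool × Bool)) (hys : ys ≠ []) :
    l.foldl mergeStep (acc ++ ys) = acc ++ l.foldl mergeStep ys := by
  induction l generalizing ys with
  | nil => rfl
  | cons r rest ih =>
      have hstep : mergeStep (acc ++ ys) r = acc ++ mergeStep ys r := by
        unfold mergeStep
        by_cases h : r.1 = ""
        · simp [h]
        · rw [if_neg h, if_neg h, List.getLast?_append_of_ne_nil acc hys]
          cases hy : ys.getLast? with
          | none => exact absurd (List.getLast?_eq_none_iff.mp hy) hys
          | some last =>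
              simp [List.dropLast_append_of_ne_nil hys, List.append_assoc]
              split <;> rfl
      simp only [List.foldl_cons, hstep]
      exact ih (mergeStep ys r) (mergeStep_ne_nil ys r hys)

theorem foldl_joinTexts (l : List (String × Bool × Bool)) (s : String) :
    l.foldl (fun acc r => acc ++ r.1) s = s ++ joinTexts l := by
  induction l generalizing s with
  | nil => simp [joinTexts]
  | cons r rest ih =>
      have h1 : joinTexts (r :: rest) = ("" ++ r.1) ++ joinTexts rest := by
        rw [joinTexts, List.foldl_cons]; exact ih ("" ++ r.1)
      rw [List.foldl_cons, ih (s ++ r.1), h1, String.empty_append, String.append_assoc]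

theorem joinTexts_cons (r : String × Bool × Bool) (l : List (String × Bool × Bool)) :
    joinTexts (r :: l) = r.1 ++ joinTexts l := by
  rw [joinTexts, List.foldl_cons, foldl_joinTexts]
  simp

-- A's loop started from one pending run (p, k) joins the current group onto p
-- and then emits the remaining groups
theorem foldl_mergeStep_group (l : List (String × Bool × Bool))
    (hl : ∀ r ∈ l, r.1 ≠ "") (p : String) (k : Bool × Bool) :
    l.foldl mergeStep [(p, k.1, k.2)] =
      (p ++ joinTexts (l.takeWhile (fun s => s.2 = k)), k.1, k.2) ::
        groupMerge (l.dropWhile (fun s => s.2 = k)) := by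
  induction l generalizing p k with
  | nil => simp [groupMerge, joinTexts]
  | cons r rest ih =>
      have hr : r.1 ≠ "" := hl r (List.mem_cons_self ..)
      have hrest : ∀ x ∈ rest, x.1 ≠ "" := fun x hx => hl x (List.mem_cons_of_mem _ hx)
      by_cases hk : k = r.2
      · have hstep : mergeStep [(p, k.1, k.2)] r = [(p ++ r.1, k.1, k.2)] := by
          simp [mergeStep, hr, hk]
        simp only [List.foldl_cons, hstep]
        rw [ih hrest (p ++ r.1) k]
        have htw : (r :: rest).takeWhile (fun s => s.2 = k) =
            r :: rest.takeWhile (fun s => s.2 = k) := by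
          simp [hk.symm]
        have hdw : (r :: rest).dropWhile (fun s => s.2 = k) =
            rest.dropWhile (fun s => s.2 = k) := by
          simp [hk.symm]
        rw [htw, hdw, joinTexts_cons, String.append_assoc]
      · have hstep : mergeStep [(p, k.1, k.2)] r = [(p, k.1, k.2)] ++ [r] := by
          have : ¬ ((k.1, k.2) = r.2) := by simpa using hk
          simp [mergeStep, hr, this]
        simp only [List.foldl_cons, hstep]
        rw [foldl_mergeStep_append rest [(p, k.1, k.2)] [r] (by simp)]
        have hr' : [r] = [(r.1, r.2.1, r.2.2)] := by simp
        rw [hr', ih hrest r.1 r.2]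
        have htw : (r :: rest).takeWhile (fun s => s.2 = k) = [] := by
          simp [Ne.symm hk]
        have hdw : (r :: rest).dropWhile (fun s => s.2 = k) = r :: rest := by
          simp [Ne.symm hk]
        rw [htw, hdw, groupMerge]
        simp [joinTexts]

-- A's loop from the empty accumulator computes the normal form
theorem foldl_mergeStep_nil (l : List (String × Bool × Bool))
    (hl : ∀ r ∈ l, r.1 ≠ "") :
    l.foldl mergeStep [] = groupMerge l := by
  cases l with
  | nil => simp [groupMerge]
  | cons x xs =>
      have hx : x.1 ≠ "" := hl x (List.mem_cons_self ..)
      have hxs : ∀ r ∈ xs, r.1 ≠ "" := fun r hr => hl r (List.mem_cons_of_mem _ hr)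
      have hstep : mergeStep [] x = [(x.1, x.2.1, x.2.2)] := by
        simp [mergeStep, hx]
      rw [List.foldl_cons, hstep, foldl_mergeStep_group xs hxs x.1 x.2, groupMerge]

-- KEY: running A's loop over l from any accumulator is gluing l's result onto it
theorem foldl_mergeStep_glue (l : List (String × Bool × Bool))
    (hl : ∀ r ∈ l, r.1 ≠ "") (acc : List (String × Bool × Bool)) :
    l.foldl mergeStep acc = glue acc (l.foldl mergeStep []) := by
  rw [foldl_mergeStep_nil l hl]
  cases l with
  | nil => cases h : acc.getLast? <;> simp [glue, groupMerge, h]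
  | cons r rest =>
      have hr : r.1 ≠ "" := hl r (List.mem_cons_self ..)
      have hrest : ∀ x ∈ rest, x.1 ≠ "" := fun x hx => hl x (List.mem_cons_of_mem _ hx)
      rw [groupMerge]
      cases hLast : acc.getLast? with
      | none =>
          have hacc : acc = [] := List.getLast?_eq_none_iff.mp hLast
          subst hacc
          have hstep : mergeStep [] r = [(r.1, r.2.1, r.2.2)] := by
            simp [mergeStep, hr]
          rw [List.foldl_cons, hstep, foldl_mergeStep_group rest hrest r.1 r.2]
          simp [glue]
      | some last =>
          by_cases hk : last.2 = r.2
          · have hstep : mergeStep acc r =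
                acc.dropLast ++ [(last.1 ++ r.1, r.2.1, r.2.2)] := by
              simp [mergeStep, hr, hLast, hk]
            rw [List.foldl_cons, hstep,
              foldl_mergeStep_append rest acc.dropLast [(last.1 ++ r.1, r.2.1, r.2.2)] (by simp)]
            have h2 : ((last.1 ++ r.1, r.2.1, r.2.2) : String × Bool × Bool).2 = r.2 := rfl
            rw [show [((last.1 ++ r.1, r.2.1, r.2.2) : String × Bool × Bool)] =
                  [(last.1 ++ r.1, r.2.1, r.2.2)] from rfl,
              foldl_mergeStep_group rest hrest (last.1 ++ r.1) r.2]
            have hglue : glue acc ((r.1 ++ joinTexts (rest.takeWhile (fun s => s.2 = r.2)),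
                r.2.1, r.2.2) :: groupMerge (rest.dropWhile (fun s => s.2 = r.2))) =
                acc.dropLast ++ (last.1 ++ (r.1 ++ joinTexts (rest.takeWhile (fun s => s.2 = r.2))),
                  r.2.1, r.2.2) :: groupMerge (rest.dropWhile (fun s => s.2 = r.2)) := by
              simp [glue, hLast, hk]
            rw [hglue, String.append_assoc]
          · have hk' : ¬ (last.2 = (r.2.1, r.2.2)) := by simpa using hk
            have hstep : mergeStep acc r = acc ++ [r] := by
              simp [mergeStep, hr, hLast, hk]
            rw [List.foldl_cons, hstep,
              foldl_mergeStep_append rest acc [r] (by simp),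
              show [r] = [(r.1, r.2.1, r.2.2)] by simp,
              foldl_mergeStep_group rest hrest r.1 r.2]
            simp [glue, hLast, hk']

-- divide and conquer computes what A's loop computes (fuel = a length bound)
theorem dcMerge_eq_foldl :
    ∀ (n : Nat) (l : List (String × Bool × Bool)), l.length ≤ n →
      (∀ r ∈ l, r.1 ≠ "") → dcMerge l = l.foldl mergeStep [] := by
  intro n
  induction n with
  | zero =>
      intro l hlen _
      have : l = [] := List.eq_nil_of_length_eq_zero (Nat.le_zero.mp hlen)
      subst this; simp [dcMerge]
  | succ n ih =>
      intro l hlen hl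
      by_cases h1 : l.length ≤ 1
      · rw [dcMerge, dif_pos h1]
        match l, h1 with
        | [], _ => rfl
        | [x], _ =>
            have hx : x.1 ≠ "" := hl x (List.mem_cons_self ..)
            simp [mergeStep, hx]
      · rw [dcMerge, dif_neg h1]
        have hmid1 : 1 ≤ l.length / 2 := Nat.le_div_iff_mul_le (by norm_num) |>.mpr (by omega)
        have hmidlt : l.length / 2 < l.length := Nat.div_lt_self (by omega) (by norm_num)
        have htlen : (l.take (l.length / 2)).length ≤ n := by
          simp [List.length_take]; omega
        have hdlen : (l.drop (l.length / 2)).length ≤ n := by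
          simp [List.length_drop]; omega
        have htne : ∀ r ∈ l.take (l.length / 2), r.1 ≠ "" :=
          fun r hr => hl r (List.mem_of_mem_take hr)
        have hdne : ∀ r ∈ l.drop (l.length / 2), r.1 ≠ "" :=
          fun r hr => hl r (List.mem_of_mem_drop hr)
        rw [ih _ htlen htne, ih _ hdlen hdne,
          ← foldl_mergeStep_glue _ hdne,
          ← List.foldl_append,
          List.take_append_drop]

-- ===== VERDICT (by name: the statement is the Claim_ definition above) =====
theorem merge_runs_spec : Claim_equal_merge_runs := by
  intro runs _
  unfold Spec_merge_runs merge_runs merge_runs_alt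
  rw [foldl_mergeStep_filter]
  have hl : ∀ r ∈ runs.filter (fun r => r.1 ≠ ""), r.1 ≠ "" := by
    intro r hr
    simpa using (List.of_mem_filter hr)
  rw [dcMerge_eq_foldl (runs.filter (fun r => r.1 ≠ "")).length _ le_rfl hl]
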